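-- pv_equiv track=rewrite | github.com/christopherblaisdell/continuous-architecture-platform-poc | portal/scripts/generate-domain-pages.py | find_domain_adrs
-- ===== SOURCE A (Python) =====
-- ADR_SERVICE_MAP = {
--     "ADR-003": ["svc-trail-management"],
--     "ADR-004": ["svc-check-in", "svc-trip-catalog"],
--     "ADR-005": ["svc-check-in"],
--     "ADR-006": ["svc-check-in"],
--     "ADR-007": ["svc-guest-profiles", "svc-check-in"],
--     "ADR-008": ["svc-guest-profiles"],
--     "ADR-009": ["svc-check-in"],
--     "ADR-010": ["svc-scheduling-orchestrator"],
--     "ADR-011": ["svc-scheduling-orchestrator"],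
--     "ADR-012": [],  # Platform-wide
--     "ADR-013": [],  # Platform-wide
-- }
--
-- def find_domain_adrs(domain_services):
--     """Find ADRs relevant to a domain based on service mapping."""
--     adrs = []
--     for adr_id, services in ADR_SERVICE_MAP.items():
--         if not services:
--             continue  # platform-wide, skip
--         for svc in services:
--             if svc in domain_services:
--                 adrs.append(adr_id)
--                 break
--     return sorted(set(adrs))
-- ===== SOURCE B (Python) =====
-- ADR_SERVICE_MAP = {
--     "ADR-003": ["svc-trail-management"],
--     "ADR-004": ["svc-check-in", "svc-trip-catalog"],
--     "ADR-005": ["svc-check-in"],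
--     "ADR-006": ["svc-check-in"],
--     "ADR-007": ["svc-guest-profiles", "svc-check-in"],
--     "ADR-008": ["svc-guest-profiles"],
--     "ADR-009": ["svc-check-in"],
--     "ADR-010": ["svc-scheduling-orchestrator"],
--     "ADR-011": ["svc-scheduling-orchestrator"],
--     "ADR-012": [],  # Platform-wide
--     "ADR-013": [],  # Platform-wide
-- }
--
-- def find_domain_adrs(domain_services):
--     """Find ADRs relevant to a domain based on service mapping."""
--     index = {}
--     for adr_id, services in ADR_SERVICE_MAP.items():
--         for svc in services:
--             index.setdefault(svc, []).append(adr_id)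
--     result = set()
--     for svc in domain_services:
--         result.update(index.get(svc, []))
--     return sorted(result)
-- ===== Notes on version B (the rewrite author's own statement) =====
-- stated objective: alternative
-- what changed: B builds a reverse index (service -> ADR ids) once and unions index lookups over the input services into a set, instead of scanning every ADR's service list and testing membership in the input with an inner break loop.
import Mathlib
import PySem

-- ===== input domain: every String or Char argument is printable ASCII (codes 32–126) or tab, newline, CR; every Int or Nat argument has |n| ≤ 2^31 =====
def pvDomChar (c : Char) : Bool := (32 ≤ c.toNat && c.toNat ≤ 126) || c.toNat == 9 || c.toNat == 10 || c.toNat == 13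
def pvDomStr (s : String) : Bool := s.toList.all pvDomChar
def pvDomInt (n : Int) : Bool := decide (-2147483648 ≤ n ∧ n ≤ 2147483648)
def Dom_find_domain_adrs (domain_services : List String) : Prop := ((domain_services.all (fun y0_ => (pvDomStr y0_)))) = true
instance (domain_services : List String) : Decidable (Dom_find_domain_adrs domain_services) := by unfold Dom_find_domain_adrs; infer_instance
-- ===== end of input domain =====

-- B replaces A's scan over every ADR (with an inner membership/break loop) by a reverse index
-- service -> ADR ids built once, unioned over the input services into a set; same sorted result.

-- module-level constant ADR_SERVICE_MAP (shared context of both functions)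
def ADR_SERVICE_MAP : PySem.Dict String (List String) := PySem.Dict.ofList [
  ("ADR-003", ["svc-trail-management"]),
  ("ADR-004", ["svc-check-in", "svc-trip-catalog"]),
  ("ADR-005", ["svc-check-in"]),
  ("ADR-006", ["svc-check-in"]),
  ("ADR-007", ["svc-guest-profiles", "svc-check-in"]),
  ("ADR-008", ["svc-guest-profiles"]),
  ("ADR-009", ["svc-check-in"]),
  ("ADR-010", ["svc-scheduling-orchestrator"]),
  ("ADR-011", ["svc-scheduling-orchestrator"]),
  ("ADR-012", []),
  ("ADR-013", [])]

-- ===== PORT A =====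
-- inner 'for svc in services: if svc in domain_services: adrs.append(adr_id); break'
def pvInnerA (domain_services : List String) (adr_id : String) (services : List String)
    (adrs : List String) : List String :=
  match services with
  | [] => adrs
  | svc :: rest =>
      if domain_services.contains svc then adrs ++ [adr_id]
      else pvInnerA domain_services adr_id rest adrs

def find_domain_adrs (domain_services : List String) : List String :=
  let adrs := ADR_SERVICE_MAP.items.foldl
    (fun adrs p => if p.2 = [] then adrs else pvInnerA domain_services p.1 p.2 adrs) []
  PySem.List.sorted (PySem.Set.ofList adrs) (fun x => x) false

-- ===== PORT B =====
-- index = {}; for adr_id, services: for svc in services: index.setdefault(svc, []).append(adr_id)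
def pvIndexB : PySem.Dict String (List String) :=
  ADR_SERVICE_MAP.items.foldl
    (fun d p => p.2.foldl (fun d svc => d.modify svc [] (· ++ [p.1])) d)
    PySem.Dict.empty

def find_domain_adrs_alt (domain_services : List String) : List String :=
  let result := domain_services.foldl
    (fun s svc => PySem.Set.update s (pvIndexB.getD svc [])) PySem.Set.empty
  PySem.List.sorted result (fun x => x) false

-- ===== PRECONDITION & SPEC =====
def Spec_find_domain_adrs (domain_services : List String) (out : List String) : Prop := out = find_domain_adrs_alt domain_services
instance (domain_services : List String) (out : List String) : Decidable (Spec_find_domain_adrs domain_services out) := by unfold Spec_find_domain_adrs; infer_instance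

-- ===== CLAIM (what is proved, stated in full; the proofs are below) =====
def Claim_equal_find_domain_adrs : Prop := ∀ (domain_services : List String), Dom_find_domain_adrs domain_services → Spec_find_domain_adrs domain_services (find_domain_adrs domain_services)

-- ===== LEMMAS AND PROOFS =====

theorem mem_pvInnerA (ds : List String) (adr a : String) (svcs acc : List String) :
    a ∈ pvInnerA ds adr svcs acc ↔ a ∈ acc ∨ (a = adr ∧ ∃ s ∈ svcs, s ∈ ds) := by
  induction svcs with
  | nil => simp [pvInnerA]
  | cons s rest ih =>
      by_cases h : s ∈ ds
      · simp [pvInnerA, List.contains_eq_mem, h]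
      · simp [pvInnerA, List.contains_eq_mem, h, ih]

theorem getD_pvIndexB (svc : String) :
    pvIndexB.getD svc [] =
      if svc = "svc-trail-management" then ["ADR-003"]
      else if svc = "svc-check-in" then ["ADR-004", "ADR-005", "ADR-006", "ADR-007", "ADR-009"]
      else if svc = "svc-trip-catalog" then ["ADR-004"]
      else if svc = "svc-guest-profiles" then ["ADR-007", "ADR-008"]
      else if svc = "svc-scheduling-orchestrator" then ["ADR-010", "ADR-011"]
      else [] := by
  have h : pvIndexB = PySem.Dict.mk [("svc-trail-management", ["ADR-003"]), ("svc-check-in", ["ADR-004", "ADR-005", "ADR-006", "ADR-007", "ADR-009"]), ("svc-trip-catalog", ["ADR-004"]), ("svc-guest-profiles", ["ADR-007", "ADR-008"]), ("svc-scheduling-orchestrator", ["ADR-010", "ADR-011"])] := by decide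
  rw [h]
  split_ifs with h1 h2 h3 h4 h5
  · subst h1; decide
  · subst h2; decide
  · subst h3; decide
  · subst h4; decide
  · subst h5; decide
  · simp [PySem.Dict.getD_eq_get?_getD, beq_iff_eq,
      Ne.symm h1, Ne.symm h2, Ne.symm h3, Ne.symm h4, Ne.symm h5, PySem.Dict.get?]

theorem existsG (ds : List String) (a : String) :
    (∃ svc ∈ ds, a ∈ pvIndexB.getD svc []) ↔
      ("svc-trail-management" ∈ ds ∧ a = "ADR-003") ∨
      ("svc-check-in" ∈ ds ∧ (a = "ADR-004" ∨ a = "ADR-005" ∨ a = "ADR-006" ∨ a = "ADR-007" ∨ a = "ADR-009")) ∨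
      ("svc-trip-catalog" ∈ ds ∧ a = "ADR-004") ∨
      ("svc-guest-profiles" ∈ ds ∧ (a = "ADR-007" ∨ a = "ADR-008")) ∨
      ("svc-scheduling-orchestrator" ∈ ds ∧ (a = "ADR-010" ∨ a = "ADR-011")) := by
  constructor
  · rintro ⟨svc, hs, ha⟩
    rw [getD_pvIndexB] at ha
    split_ifs at ha with h1 h2 h3 h4 h5 <;> subst_vars <;> simp_all
  · rintro (⟨h, ha⟩ | ⟨h, ha⟩ | ⟨h, ha⟩ | ⟨h, ha⟩ | ⟨h, ha⟩) <;>
      exact ⟨_, h, by rw [getD_pvIndexB]; simp; tauto⟩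

theorem mem_foldl_update (ds : List String) (init : PySem.Set String) (a : String) :
    a ∈ ds.foldl (fun s svc => PySem.Set.update s (pvIndexB.getD svc [])) init ↔
      a ∈ init ∨ ∃ svc ∈ ds, a ∈ pvIndexB.getD svc [] := by
  induction ds generalizing init with
  | nil => simp
  | cons d rest ih =>
      simp [List.foldl, ih, PySem.Set.mem_update]
      tauto

theorem nodup_foldl_update (ds : List String) (init : PySem.Set String) (h : init.Nodup) :
    (ds.foldl (fun s svc => PySem.Set.update s (pvIndexB.getD svc [])) init).Nodup := by
  induction ds generalizing init with
  | nil => exact h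
  | cons d rest ih => exact ih _ (PySem.Set.nodup_update _ _ h)

set_option maxHeartbeats 1000000 in
-- ===== VERDICT (by name: the statement is the Claim_ definition above) =====
theorem find_domain_adrs_spec : Claim_equal_find_domain_adrs := by
  intro ds _
  unfold Spec_find_domain_adrs find_domain_adrs find_domain_adrs_alt
  apply PySem.List.sorted_eq_sorted_of_perm _ _ _ (fun a b h => h)
  refine (List.perm_ext_iff_of_nodup (PySem.Set.nodup_ofList _)
    (nodup_foldl_update ds PySem.Set.empty (by simp [PySem.Set.empty]))).mpr ?_
  intro a
  rw [PySem.Set.mem_ofList, mem_foldl_update, existsG]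
  have hitems : ADR_SERVICE_MAP.items = [
    ("ADR-003", ["svc-trail-management"]),
    ("ADR-004", ["svc-check-in", "svc-trip-catalog"]),
    ("ADR-005", ["svc-check-in"]),
    ("ADR-006", ["svc-check-in"]),
    ("ADR-007", ["svc-guest-profiles", "svc-check-in"]),
    ("ADR-008", ["svc-guest-profiles"]),
    ("ADR-009", ["svc-check-in"]),
    ("ADR-010", ["svc-scheduling-orchestrator"]),
    ("ADR-011", ["svc-scheduling-orchestrator"]),
    ("ADR-012", []),
    ("ADR-013", [])] := by decide
  rw [hitems]
  simp [List.foldl, mem_pvInnerA]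
  tauto
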